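-- pv_equiv track=rewrite | github.com/kyungwon-dev/Algorithm_Solved | 프로그래머스/1/258712. 가장 많이 받은 선물/가장 많이 받은 선물.py | solution
-- ===== SOURCE A (Python) =====
-- def solution(friends, gifts):
--     answer = 0
--     num_to_friend  = { i:friends[i] for i in range(len(friends)) }
--     friend_to_num = { str(friends[i]):i for i in range(len(friends)) }
--     friend_gift_index = { str(friends[i]):0 for i in range(len(friends)) }
--
--     gifts_map = [[0 for j in range(len(friends))] for i in range(len(friends))]
--     for gift in gifts:
--         snd, rcv = list(map(str, gift.split(" ")))
--         gifts_map[friend_to_num[snd]][friend_to_num[rcv]] += 1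
--
--     for i, f in num_to_friend.items():
--         friend_gift_index[f] = sum(gifts_map[i][:]) - sum([gifts_map[j][i] for j in range(len(gifts_map))])
--
--     gift_result = [0 for _ in range(len(friends))]
--     for i in range(len(gifts_map)):
--         for j in range(len(gifts_map)):
--
--             if i==j:
--                 continue
--             if gifts_map[i][j] > gifts_map[j][i] :
--                 gift_result[i]+=1
--             elif gifts_map[i][j] == gifts_map[j][i]:
--                 if friend_gift_index[num_to_friend[j]] < friend_gift_index[num_to_friend[i]]:
--                     gift_result[i]+=1
--     return max(gift_result)
-- ===== SOURCE B (Python) =====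
-- def solution(friends, gifts):
--     n = len(friends)
--     idx = {f: i for i, f in enumerate(friends)}
--     cnt = {}
--     gi = [0] * n
--     adj = {}
--     for g in gifts:
--         s, r = g.split(" ")
--         i, j = idx[s], idx[r]
--         cnt[(i, j)] = cnt.get((i, j), 0) + 1
--         gi[i] += 1
--         gi[j] -= 1
--         adj.setdefault(i, set()).add(j)
--         adj.setdefault(j, set()).add(i)
--     first = {}
--     for p, v in enumerate(sorted(gi)):
--         if v not in first:
--             first[v] = p
--     best = 0
--     for i in range(n):
--         w = first[gi[i]]
--         for j in adj.get(i, set()):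
--             a = cnt.get((i, j), 0)
--             b = cnt.get((j, i), 0)
--             if a != b:
--                 w += (1 if a > b else 0) - (1 if gi[j] < gi[i] else 0)
--         best = max(best, w)
--     return best
-- ===== Notes on version B (the rewrite author's own statement) =====
-- stated objective: alternative
-- what changed: B never builds or scans an N x N structure: one pass over gifts builds a sparse (sender,receiver) counter, net gift-index list and adjacency sets, each friend's baseline score is read off as the position of the first occurrence of its gift index in the sorted gift-index list, and only pairs that actually exchanged gifts are visited to correct that baseline, under a running max instead of a result list.
-- outside the precondition, e.g. on solution(['a', 'a', 'b'], ['a b']): A returns 1, B returns 2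
import Mathlib
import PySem

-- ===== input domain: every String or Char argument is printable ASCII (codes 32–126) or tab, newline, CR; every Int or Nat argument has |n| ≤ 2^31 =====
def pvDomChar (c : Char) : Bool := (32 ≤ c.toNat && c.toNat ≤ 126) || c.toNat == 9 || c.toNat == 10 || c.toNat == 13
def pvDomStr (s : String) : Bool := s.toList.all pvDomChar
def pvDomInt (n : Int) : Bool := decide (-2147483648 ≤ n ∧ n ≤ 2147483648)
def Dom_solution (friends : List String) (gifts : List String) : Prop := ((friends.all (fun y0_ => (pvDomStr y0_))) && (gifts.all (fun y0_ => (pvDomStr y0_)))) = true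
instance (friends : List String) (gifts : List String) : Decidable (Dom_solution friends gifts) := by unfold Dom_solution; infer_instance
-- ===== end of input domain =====

-- B avoids A's dense N×N matrix and N×N scoring scan altogether: one pass over the gifts builds a
-- sparse pair counter, the net gift-index list and adjacency sets; each friend's baseline score is the
-- position of the first occurrence of its gift index in the sorted gift-index list, corrected only at
-- the pairs that actually exchanged gifts, under a running max (objective: alternative algorithm).

-- ===== PORT A =====
-- Each helper is one statement of the Python body of A, transliterated.
def pyA_num_to_friend (friends : List String) : PySem.Dict Int String :=
  (PySem.List.pyRange 0 (friends.length : Int) 1).foldl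
    (fun d i => d.insert i (PySem.List.pyGetD friends i "")) PySem.Dict.empty

def pyA_friend_to_num (friends : List String) : PySem.Dict String Int :=
  (PySem.List.pyRange 0 (friends.length : Int) 1).foldl
    (fun d i => d.insert (PySem.List.pyGetD friends i "") i) PySem.Dict.empty

def pyA_fgi0 (friends : List String) : PySem.Dict String Int :=
  (PySem.List.pyRange 0 (friends.length : Int) 1).foldl
    (fun d i => d.insert (PySem.List.pyGetD friends i "") 0) PySem.Dict.empty

def pyA_giftsMap0 (friends : List String) : List (List Int) :=
  (PySem.List.pyRange 0 (friends.length : Int) 1).map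
    (fun _ => (PySem.List.pyRange 0 (friends.length : Int) 1).map (fun _ => (0:Int)))

-- the body of A's "for gift in gifts" loop
def pyA_step (friends : List String) (m : List (List Int)) (gift : String) : List (List Int) :=
  let parts := (PySem.Str.split? gift " ").getD []   -- sep ≠ "" so split? is exact (some _)
  let snd := parts.getD 0 ""    -- 2-tuple unpack: ValueError unless parts.length = 2 (excluded by Pre_)
  let rcv := parts.getD 1 ""
  let i := (pyA_friend_to_num friends).getD snd 0    -- KeyError if absent (excluded by Pre_)
  let j := (pyA_friend_to_num friends).getD rcv 0
  PySem.List.pySetD m i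
    (PySem.List.pySetD (PySem.List.pyGetD m i [])
      j (PySem.List.pyGetD (PySem.List.pyGetD m i []) j 0 + 1))

def pyA_giftsMap (friends : List String) (gifts : List String) : List (List Int) :=
  gifts.foldl (pyA_step friends) (pyA_giftsMap0 friends)

def pyA_fgi (friends : List String) (gifts : List String) : PySem.Dict String Int :=
  (pyA_num_to_friend friends).items.foldl (fun d p =>
      d.insert p.2
        ((PySem.List.slice (PySem.List.pyGetD (pyA_giftsMap friends gifts) p.1 []) none none).sum
          - ((PySem.List.pyRange 0 ((pyA_giftsMap friends gifts).length : Int) 1).map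
               (fun j => PySem.List.pyGetD
                  (PySem.List.pyGetD (pyA_giftsMap friends gifts) j []) p.1 0)).sum))
    (pyA_fgi0 friends)

def pyA_result (friends : List String) (gifts : List String) : List Int :=
  let gifts_map := pyA_giftsMap friends gifts
  let gift_result0 : List Int := (PySem.List.pyRange 0 (friends.length : Int) 1).map (fun _ => (0:Int))
  (PySem.List.pyRange 0 (gifts_map.length : Int) 1).foldl (fun l i =>
      (PySem.List.pyRange 0 (gifts_map.length : Int) 1).foldl (fun l j =>
        if i == j then l
        else if PySem.List.pyGetD (PySem.List.pyGetD gifts_map i []) j 0 >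
                PySem.List.pyGetD (PySem.List.pyGetD gifts_map j []) i 0 then
          PySem.List.pySetD l i (PySem.List.pyGetD l i 0 + 1)
        else if PySem.List.pyGetD (PySem.List.pyGetD gifts_map i []) j 0 ==
                PySem.List.pyGetD (PySem.List.pyGetD gifts_map j []) i 0 then
          if (pyA_fgi friends gifts).getD ((pyA_num_to_friend friends).getD j "") 0 <
             (pyA_fgi friends gifts).getD ((pyA_num_to_friend friends).getD i "") 0 then
            PySem.List.pySetD l i (PySem.List.pyGetD l i 0 + 1)
          else l
        else l) l) gift_result0

def solution (friends : List String) (gifts : List String) : Int :=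
  (PySem.List.max? (pyA_result friends gifts) (fun x => x)).getD 0
  -- max([]) raises ValueError (friends = [] is excluded by Pre_)

-- ===== PORT B =====
def pyB_idx (friends : List String) : PySem.Dict String Int :=
  (PySem.List.enumerate friends).foldl (fun d p => d.insert p.2 p.1) PySem.Dict.empty

-- the body of B's single pass over gifts: pair counter, gift-index list, adjacency sets
def pyB_step (friends : List String)
    (st : PySem.Dict (Int × Int) Int × List Int × PySem.Dict Int (PySem.Set Int)) (g : String) :
    PySem.Dict (Int × Int) Int × List Int × PySem.Dict Int (PySem.Set Int) :=
  let parts := (PySem.Str.split? g " ").getD []   -- sep ≠ "" so split? is exact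
  let s := parts.getD 0 ""    -- 2-tuple unpack: ValueError unless 2 parts (excluded by Pre_)
  let r := parts.getD 1 ""
  let i := (pyB_idx friends).getD s 0   -- KeyError if absent (excluded by Pre_)
  let j := (pyB_idx friends).getD r 0
  let gi1 := PySem.List.pySetD st.2.1 i (PySem.List.pyGetD st.2.1 i 0 + 1)   -- gi[i] += 1
  let gi2 := PySem.List.pySetD gi1 j (PySem.List.pyGetD gi1 j 0 - 1)         -- gi[j] -= 1
  (st.1.insert (i, j) (st.1.getD (i, j) 0 + 1),
   gi2,
   -- adj.setdefault(i, set()).add(j): adj[i] becomes add(adj.get(i, set()), j) — Dict.modify is exact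
   (st.2.2.modify i [] (fun t => PySem.Set.add t j)).modify j [] (fun t => PySem.Set.add t i))

def pyB_st (friends : List String) (gifts : List String) :
    PySem.Dict (Int × Int) Int × List Int × PySem.Dict Int (PySem.Set Int) :=
  gifts.foldl (pyB_step friends)
    (PySem.Dict.empty, PySem.List.pyRepeat [(0:Int)] (friends.length : Int), PySem.Dict.empty)

-- first occurrence position of each value in sorted(gi)
def pyB_first (friends : List String) (gifts : List String) : PySem.Dict Int Int :=
  (PySem.List.enumerate (PySem.List.sorted (pyB_st friends gifts).2.1 (fun x => x) false)).foldl
    (fun d p => if d.contains p.2 then d else d.insert p.2 p.1) PySem.Dict.empty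

-- w for friend i: baseline first[gi[i]] corrected over adj[i]; the sum is set-iteration-order independent
def pyB_w (friends : List String) (gifts : List String) (i : Int) : Int :=
  ((pyB_st friends gifts).2.2.getD i []).foldl (fun w j =>
      if (pyB_st friends gifts).1.getD (i, j) 0 ≠ (pyB_st friends gifts).1.getD (j, i) 0 then
        w + ((if (pyB_st friends gifts).1.getD (i, j) 0 > (pyB_st friends gifts).1.getD (j, i) 0
              then (1:Int) else 0)
             - (if PySem.List.pyGetD (pyB_st friends gifts).2.1 j 0 <
                   PySem.List.pyGetD (pyB_st friends gifts).2.1 i 0 then (1:Int) else 0))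
      else w)
    ((pyB_first friends gifts).getD (PySem.List.pyGetD (pyB_st friends gifts).2.1 i 0) 0)
    -- first[gi[i]]: the key is always present (gi[i] occurs in sorted(gi))

def solution_alt (friends : List String) (gifts : List String) : Int :=
  (PySem.List.pyRange 0 (friends.length : Int) 1).foldl
    (fun best i => max best (pyB_w friends gifts i)) 0

-- ===== PRECONDITION & SPEC =====
-- Pre_ excludes (a) friends = [] (A raises ValueError on max([])), (b) gifts whose entry does not
-- split on " " into exactly two names present in friends (A raises ValueError/KeyError there), and
-- (c) duplicate friend names, on which A's behaviour is an accident of its name-keyed dicts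
-- collapsing the duplicates into one entry (see the cite in claim.json).
def Pre_solution (friends : List String) (gifts : List String) : Prop :=
  friends ≠ [] ∧ friends.Nodup ∧
  ∀ g ∈ gifts, ((PySem.Str.split? g " ").getD []).length = 2 ∧
    ((PySem.Str.split? g " ").getD []).getD 0 "" ∈ friends ∧
    ((PySem.Str.split? g " ").getD []).getD 1 "" ∈ friends
instance (friends : List String) (gifts : List String) : Decidable (Pre_solution friends gifts) := by
  unfold Pre_solution; infer_instance

def pvWitness_solution : List String × List String := (["muzi", "frodo"], ["muzi frodo"])

def Spec_solution (friends : List String) (gifts : List String) (out : Int) : Prop :=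
  out = solution_alt friends gifts
instance (friends : List String) (gifts : List String) (out : Int) :
    Decidable (Spec_solution friends gifts out) := by unfold Spec_solution; infer_instance

-- ===== CLAIM (what is proved, stated in full; the proofs are below) =====
def Claim_equal_solution : Prop := ∀ (friends : List String) (gifts : List String),
  Dom_solution friends gifts → Pre_solution friends gifts →
  Spec_solution friends gifts (solution friends gifts)

-- ===== LEMMAS AND PROOFS =====

-- matrix accessors (proof-side abbreviations for A's gifts_map readings)
def pvGetE (M : List (List Int)) (i j : Nat) : Int := (M.getD i []).getD j 0
def pvRowS (M : List (List Int)) (i : Nat) : Int := (M.getD i []).sum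
def pvColS (M : List (List Int)) (i : Nat) : Int :=
  ((List.range M.length).map (fun j => pvGetE M j i)).sum
def pvGI (M : List (List Int)) (i : Nat) : Int := pvRowS M i - pvColS M i
def pvBeat (M : List (List Int)) (i j : Nat) : Bool :=
  decide (pvGetE M j i < pvGetE M i j) ||
  (pvGetE M i j == pvGetE M j i && decide (pvGI M j < pvGI M i))

-- A's score of friend k, and the two summands B computes it from
def pvCntA (M : List (List Int)) (n k : Nat) : Nat :=
  (List.range n).countP (fun j => decide (j ≠ k) && pvBeat M k j)
def pvW (M : List (List Int)) (n k : Nat) : Int := (pvCntA M n k : Int)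

-- the shared invariant between A's matrix and B's counter / gift-index list / adjacency dict
def pvInv (n : Nat) (M : List (List Int)) (c : PySem.Dict (Int × Int) Int)
    (gi : List Int) (adj : PySem.Dict Int (PySem.Set Int)) : Prop :=
  M.length = n ∧ (∀ i, i < n → (M.getD i []).length = n) ∧
  (∀ i j, i < n → j < n → pvGetE M i j = c.getD ((i:Int), (j:Int)) 0) ∧
  gi.length = n ∧ (∀ i, i < n → gi.getD i 0 = pvGI M i) ∧
  (∀ i j, i < n → j < n → pvGetE M i j ≠ 0 →
    ((j:Int) ∈ adj.getD (i:Int) [] ∧ (i:Int) ∈ adj.getD (j:Int) [])) ∧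
  (∀ x : Int, ∀ y ∈ adj.getD x [], ∃ k : Nat, k < n ∧ y = (k:Int)) ∧
  (∀ x : Int, (adj.getD x []).Nodup)

-- pointwise increment of a score list (shape of A's scoring loop body)
def pvIncr (l : List Int) (t : Option Nat) : List Int :=
  match t with
  | some k => l.set k (l.getD k 0 + 1)
  | none => l

def pvTgA (M : List (List Int)) (p : Nat × Nat) : Option Nat :=
  if p.1 ≠ p.2 ∧ pvBeat M p.1 p.2 then some p.1 else none

theorem sum_set_int (l : List Int) (k : Nat) (v : Int) (h : k < l.length) :
    (l.set k v).sum = l.sum + v - l[k] := by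
  have hl : l.sum = (l.take k).sum + l[k] + (l.drop (k+1)).sum := by
    conv_lhs => rw [show l = l.take k ++ l[k] :: l.drop (k+1) from
      (List.take_append_drop k l).symm.trans (by rw [List.drop_eq_getElem_cons h])]
    rw [List.sum_append, List.sum_cons]; ring
  rw [List.sum_set, hl, if_pos h]; ring

theorem getD_set_self {α : Type} (l : List α) (k : Nat) (v d : α) (h : k < l.length) :
    (l.set k v).getD k d = v := by
  simp [List.getD, h]

theorem getD_set_ne {α : Type} (l : List α) (k m : Nat) (v d : α) (h : m ≠ k) :
    (l.set k v).getD m d = l.getD m d := by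
  simp [List.getD, Ne.symm h]

theorem sum_indicator_range (n a : Nat) (h : a < n) :
    (((List.range n).map (fun j => if j = a then (1:Int) else 0)).sum) = 1 := by
  induction n with
  | zero => omega
  | succ m ih =>
    rw [List.range_succ, List.map_append, List.sum_append]
    by_cases hm : a = m
    · subst hm
      have hz : ∀ j ∈ List.range a, (if j = a then (1:Int) else 0) = 0 := by
        intro j hj; simp at hj; simp [Nat.ne_of_lt hj]
      rw [List.map_congr_left hz]; simp
    · rw [ih (by omega)]; simp [Ne.symm hm]

-- generic: folding inserts with injective keys over range m
theorem get?_foldl_insert_range {κ ν : Type} [BEq κ] [LawfulBEq κ]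
    (m : Nat) (key : Nat → κ) (v : Nat → ν)
    (hinj : ∀ a, a < m → ∀ b, b < m → key a = key b → a = b)
    (D : PySem.Dict κ ν) (k : Nat) (hk : k < m) :
    ((List.range m).foldl (fun d i => d.insert (key i) (v i)) D).get? (key k) = some (v k) := by
  induction m generalizing D with
  | zero => omega
  | succ m ih =>
    rw [List.range_succ, List.foldl_append, List.foldl_cons, List.foldl_nil]
    by_cases hkm : k = m
    · subst hkm; exact PySem.Dict.get?_insert_self _ _ _
    · have hk' : k < m := by omega
      rw [PySem.Dict.get?_insert_of_ne _ _
          (fun he => hkm (hinj k (by omega) m (by omega) he))]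
      exact ih (fun a ha b hb he => hinj a (by omega) b (by omega) he) D hk'

theorem f2n_get? (friends : List String) (hnd : friends.Nodup) (k : Nat)
    (hk : k < friends.length) :
    (pyA_friend_to_num friends).get? friends[k] = some (k : Int) := by
  have hinj : ∀ a, a < friends.length → ∀ b, b < friends.length →
      friends.getD a "" = friends.getD b "" → a = b := by
    intro a ha b hb he
    rw [List.getD_eq_getElem friends "" ha, List.getD_eq_getElem friends "" hb] at he
    exact (List.Nodup.getElem_inj_iff hnd).mp he
  unfold pyA_friend_to_num
  rw [PySem.List.pyRange_zero_nat, List.foldl_map]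
  simp only [PySem.List.pyGetD_natCast]
  have := get?_foldl_insert_range friends.length (fun i => friends.getD i "")
    (fun i => (i : Int)) hinj PySem.Dict.empty k hk
  dsimp only at this
  rwa [List.getD_eq_getElem friends "" hk] at this

theorem f2n_getD (friends : List String) (hnd : friends.Nodup) (k : Nat)
    (hk : k < friends.length) :
    (pyA_friend_to_num friends).getD friends[k] 0 = (k : Int) := by
  rw [PySem.Dict.getD_eq_get?_getD, f2n_get? friends hnd k hk]; rfl

theorem n2f_getD (friends : List String) (k : Nat) (hk : k < friends.length) :
    (pyA_num_to_friend friends).getD (k : Int) "" = friends[k] := by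
  unfold pyA_num_to_friend
  rw [PySem.List.pyRange_zero_nat, List.foldl_map]
  simp only [PySem.List.pyGetD_natCast]
  have := get?_foldl_insert_range friends.length (fun i => (i : Int))
    (fun i => friends.getD i "")
    (fun a _ b _ he => by simpa using he)
    PySem.Dict.empty k hk
  dsimp only at this
  rw [PySem.Dict.getD_eq_get?_getD, this, Option.getD_some, List.getD_eq_getElem friends "" hk]

theorem idx_eq (friends : List String) : pyB_idx friends = pyA_friend_to_num friends := by
  unfold pyB_idx pyA_friend_to_num
  rw [PySem.List.enumerate_eq_map_pyRange friends "", List.foldl_map]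
  simp [PySem.List.len]

theorem n2f_items (friends : List String) :
    (pyA_num_to_friend friends).items =
      (PySem.List.pyRange 0 (friends.length : Int) 1).map
        (fun i => (i, PySem.List.pyGetD friends i "")) := by
  unfold pyA_num_to_friend
  have := PySem.Dict.items_foldl_insert_fresh (PySem.List.pyRange 0 (friends.length : Int) 1)
    (fun a => a) (fun a => PySem.List.pyGetD friends a "") PySem.Dict.empty
    (fun a _ => PySem.Dict.contains_empty a)
    (by simpa using PySem.List.nodup_pyRange_one 0 (friends.length : Int))
  simpa using this

theorem fgi_getD (friends gifts : List String) (hnd : friends.Nodup) (k : Nat)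
    (hk : k < friends.length) :
    (pyA_fgi friends gifts).getD friends[k] 0 = pvGI (pyA_giftsMap friends gifts) k := by
  have hinj : ∀ a, a < friends.length → ∀ b, b < friends.length →
      friends.getD a "" = friends.getD b "" → a = b := by
    intro a ha b hb he
    rw [List.getD_eq_getElem friends "" ha, List.getD_eq_getElem friends "" hb] at he
    exact (List.Nodup.getElem_inj_iff hnd).mp he
  unfold pyA_fgi
  rw [n2f_items, List.foldl_map, PySem.List.pyRange_zero_nat friends.length, List.foldl_map]
  have hfun : ∀ (d : PySem.Dict String Int) (i : Nat),
      (d.insert (i, PySem.List.pyGetD friends (i : Int) "").2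
        ((PySem.List.slice (PySem.List.pyGetD (pyA_giftsMap friends gifts)
            ((i : Int), PySem.List.pyGetD friends (i : Int) "").1 []) none none).sum
          - ((PySem.List.pyRange 0 ((pyA_giftsMap friends gifts).length : Int) 1).map
               (fun j => PySem.List.pyGetD
                  (PySem.List.pyGetD (pyA_giftsMap friends gifts) j [])
                  ((i : Int), PySem.List.pyGetD friends (i : Int) "").1 0)).sum))
      = d.insert (friends.getD i "") (pvGI (pyA_giftsMap friends gifts) i) := by
    intro d i
    unfold pvGI pvRowS pvColS pvGetE
    rw [PySem.List.slice_none_none]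
    rw [PySem.List.pyRange_zero_nat (pyA_giftsMap friends gifts).length, List.map_map]
    simp [Function.comp_def]
  simp only [hfun]
  have := get?_foldl_insert_range friends.length (fun i => friends.getD i "")
    (fun i => pvGI (pyA_giftsMap friends gifts) i) hinj (pyA_fgi0 friends) k hk
  dsimp only at this
  rw [List.getD_eq_getElem friends "" hk] at this
  rw [PySem.Dict.getD_eq_get?_getD, this, Option.getD_some]

-- one gift updates matrix entry (a,b); effect on B's three structures preserves pvInv
theorem inv_update (n a b : Nat) (ha : a < n) (hb : b < n)
    (M : List (List Int)) (c : PySem.Dict (Int × Int) Int) (gi : List Int)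
    (adj : PySem.Dict Int (PySem.Set Int))
    (hI : pvInv n M c gi adj) :
    pvInv n (M.set a ((M.getD a []).set b ((M.getD a []).getD b 0 + 1)))
      (c.insert ((a:Int),(b:Int)) (c.getD ((a:Int),(b:Int)) 0 + 1))
      ((gi.set a (gi.getD a 0 + 1)).set b ((gi.set a (gi.getD a 0 + 1)).getD b 0 - 1))
      ((adj.modify (a:Int) [] (fun t => PySem.Set.add t (b:Int))).modify (b:Int) []
        (fun t => PySem.Set.add t (a:Int))) := by
  obtain ⟨hlen, hrows, hcnt, hgilen, hgiv, hadj, hbnd, hndp⟩ := hI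
  set row := M.getD a [] with hrow
  have hrlen : row.length = n := hrows a ha
  have hblt : b < row.length := by omega
  set row' := row.set b (row.getD b 0 + 1) with hrow'
  have hMget : ∀ i, (M.set a row').getD i [] = if i = a then row' else M.getD i [] := by
    intro i
    by_cases hia : i = a
    · rw [if_pos hia, hia]
      exact getD_set_self M a row' [] (by omega)
    · rw [if_neg hia]; exact getD_set_ne M a i row' [] hia
  have hgetE : ∀ i j, pvGetE (M.set a row') i j =
      pvGetE M i j + (if i = a ∧ j = b then 1 else 0) := by
    intro i j
    unfold pvGetE
    rw [hMget i]
    by_cases hia : i = a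
    · rw [if_pos hia, hia]
      by_cases hjb : j = b
      · rw [hjb, if_pos ⟨rfl, rfl⟩, hrow', getD_set_self row b _ 0 hblt]
      · rw [if_neg (by tauto), hrow', getD_set_ne row b j _ 0 hjb]; ring
    · rw [if_neg hia, if_neg (by tauto)]; ring
  have hrowS : ∀ i, i < n → pvRowS (M.set a row') i = pvRowS M i + (if i = a then 1 else 0) := by
    intro i hi
    unfold pvRowS
    rw [hMget i]
    by_cases hia : i = a
    · rw [if_pos hia, if_pos hia, hrow', sum_set_int row b _ hblt,
        List.getD_eq_getElem row 0 hblt, hia]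
      rw [← hrow]
      ring
    · rw [if_neg hia, if_neg hia]
      ring
  have hcolS : ∀ i, i < n → pvColS (M.set a row') i = pvColS M i + (if i = b then 1 else 0) := by
    intro i hi
    unfold pvColS
    have hleneq : (M.set a row').length = M.length := by simp
    rw [hleneq]
    have hmap : ∀ j ∈ List.range M.length,
        pvGetE (M.set a row') j i = pvGetE M j i + (if j = a ∧ i = b then 1 else 0) :=
      fun j _ => hgetE j i
    rw [List.map_congr_left hmap, PySem.List.sum_map_add_int]
    by_cases hib : i = b
    · simp only [hib, and_true, if_pos]
      rw [sum_indicator_range M.length a (by omega)]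
    · have hz : ∀ j ∈ List.range M.length, (if j = a ∧ i = b then (1:Int) else 0) = 0 := by
        intro j _; simp [hib]
      rw [List.map_congr_left hz, if_neg hib]
      simp
  have halen : a < gi.length := by omega
  set gi1 := gi.set a (gi.getD a 0 + 1) with hgi1
  have hgi1len : gi1.length = n := by rw [hgi1, List.length_set]; omega
  have hgi1v : ∀ i, gi1.getD i 0 = gi.getD i 0 + (if i = a then 1 else 0) := by
    intro i
    by_cases hia : i = a
    · rw [if_pos hia, hia, hgi1, getD_set_self gi a _ 0 halen]
    · rw [if_neg hia, hgi1, getD_set_ne gi a i _ 0 hia]; ring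
  set A1 := adj.modify (a:Int) [] (fun t => PySem.Set.add t (b:Int)) with hA1d
  have hA1 : ∀ x : Int, A1.getD x [] =
      if x = (a:Int) then PySem.Set.add (adj.getD (a:Int) []) (b:Int) else adj.getD x [] := by
    intro x
    rw [hA1d, PySem.Dict.getD_modify]
  have hA2 : ∀ x : Int, (A1.modify (b:Int) [] (fun t => PySem.Set.add t (a:Int))).getD x [] =
      if x = (b:Int) then PySem.Set.add (A1.getD (b:Int) []) (a:Int) else A1.getD x [] := by
    intro x
    rw [PySem.Dict.getD_modify]
  have hmono : ∀ (x y : Int), y ∈ adj.getD x [] →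
      y ∈ (A1.modify (b:Int) [] (fun t => PySem.Set.add t (a:Int))).getD x [] := by
    intro x y hy
    have h1 : y ∈ A1.getD x [] := by
      rw [hA1]
      split_ifs with h
      · exact (PySem.Set.mem_add _ _ _).mpr (Or.inl (h ▸ hy))
      · exact hy
    rw [hA2]
    split_ifs with h
    · exact (PySem.Set.mem_add _ _ _).mpr (Or.inl (h ▸ h1))
    · exact h1
  refine ⟨by simp [hlen], ?_, ?_, ?_, ?_, ?_, ?_, ?_⟩
  · intro i hi
    rw [hMget i]
    by_cases hia : i = a
    · rw [if_pos hia, hrow', List.length_set]; exact hrlen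
    · rw [if_neg hia]; exact hrows i hi
  · intro i j hi hj
    rw [hgetE i j, PySem.Dict.getD_insert, hcnt i j hi hj]
    by_cases hab : i = a ∧ j = b
    · rw [if_pos ⟨hab.1, hab.2⟩, if_pos (by simp [hab.1, hab.2]), hab.1, hab.2]
    · rw [if_neg hab, if_neg (by simpa [Prod.ext_iff, Nat.cast_inj] using hab)]; ring
  · rw [List.length_set]; exact hgi1len
  · intro i hi
    have hblt1 : b < gi1.length := by omega
    have hv2 : (gi1.set b (gi1.getD b 0 - 1)).getD i 0
        = gi1.getD i 0 - (if i = b then 1 else 0) := by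
      by_cases hib : i = b
      · rw [if_pos hib, hib, getD_set_self gi1 b _ 0 hblt1]
      · rw [if_neg hib, getD_set_ne gi1 b i _ 0 hib]; ring
    rw [hv2, hgi1v i]
    unfold pvGI
    rw [hrowS i hi, hcolS i hi, hgiv i hi]
    unfold pvGI
    ring
  · intro i j hi hj hne
    rw [hgetE i j] at hne
    by_cases hab : i = a ∧ j = b
    · obtain ⟨rfl, rfl⟩ := hab
      constructor
      · rw [hA2]
        split_ifs with h
        · exact (PySem.Set.mem_add _ _ _).mpr (Or.inr h.symm)
        · rw [hA1, if_pos rfl]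
          exact (PySem.Set.mem_add _ _ _).mpr (Or.inr rfl)
      · rw [hA2, if_pos rfl]
        exact (PySem.Set.mem_add _ _ _).mpr (Or.inr rfl)
    · have hE : pvGetE M i j ≠ 0 := by
        rw [if_neg hab] at hne
        simpa using hne
      obtain ⟨h1, h2⟩ := hadj i j hi hj hE
      exact ⟨hmono _ _ h1, hmono _ _ h2⟩
  · intro x y hy
    rw [hA2] at hy
    have hfrom1 : ∀ z : Int, ∀ w ∈ A1.getD z [], ∃ k : Nat, k < n ∧ w = (k:Int) := by
      intro z w hw
      rw [hA1] at hw
      by_cases h : z = (a:Int)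
      · rw [if_pos h] at hw
        rcases (PySem.Set.mem_add _ _ _).mp hw with h' | h'
        · exact hbnd _ _ h'
        · exact ⟨b, hb, h'⟩
      · rw [if_neg h] at hw
        exact hbnd _ _ hw
    by_cases h : x = (b:Int)
    · rw [if_pos h] at hy
      rcases (PySem.Set.mem_add _ _ _).mp hy with h' | h'
      · exact hfrom1 _ _ h'
      · exact ⟨a, ha, h'⟩
    · rw [if_neg h] at hy
      exact hfrom1 _ _ hy
  · intro x
    rw [hA2]
    have hnd1 : ∀ z : Int, (A1.getD z []).Nodup := by
      intro z
      rw [hA1]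
      split_ifs
      · exact PySem.Set.nodup_add _ _ (hndp _)
      · exact hndp _
    split_ifs
    · exact PySem.Set.nodup_add _ _ (hnd1 _)
    · exact hnd1 _


theorem inv_init (friends : List String) :
    pvInv friends.length (pyA_giftsMap0 friends) PySem.Dict.empty
      (PySem.List.pyRepeat [(0:Int)] (friends.length : Int)) PySem.Dict.empty := by
  have hrep : pyA_giftsMap0 friends =
      List.replicate friends.length (List.replicate friends.length (0:Int)) := by
    unfold pyA_giftsMap0
    rw [List.map_const', List.map_const']
    simp [PySem.List.length_pyRange_one]
  have hgirep : PySem.List.pyRepeat [(0:Int)] (friends.length : Int)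
      = List.replicate friends.length (0:Int) := by
    rw [PySem.List.pyRepeat_singleton]; simp
  rw [hrep, hgirep]
  have hrow0 : ∀ i, i < friends.length →
      pvRowS (List.replicate friends.length (List.replicate friends.length (0:Int))) i = 0 := by
    intro i hi
    unfold pvRowS
    rw [List.getD_replicate _ hi]; simp
  have hcol0 : ∀ i, i < friends.length →
      pvColS (List.replicate friends.length (List.replicate friends.length (0:Int))) i = 0 := by
    intro i hi
    unfold pvColS pvGetE
    have hz : ∀ j ∈ List.range (List.replicate friends.length
        (List.replicate friends.length (0:Int))).length,
        ((List.replicate friends.length (List.replicate friends.length (0:Int))).getD j []).getD i 0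
          = 0 := by
      intro j hj
      simp only [List.length_replicate, List.mem_range] at hj
      rw [List.getD_replicate _ hj]; simp
    rw [List.map_congr_left hz]; simp
  have hE0 : ∀ i j, i < friends.length → j < friends.length →
      pvGetE (List.replicate friends.length (List.replicate friends.length (0:Int))) i j = 0 := by
    intro i j hi hj
    unfold pvGetE
    rw [List.getD_replicate _ hi, List.getD_replicate _ hj]
  refine ⟨by simp, ?_, ?_, by simp, ?_, ?_, ?_, ?_⟩
  · intro i hi; rw [List.getD_replicate _ hi]; simp
  · intro i j hi hj
    rw [hE0 i j hi hj, PySem.Dict.getD_empty]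
  · intro i hi
    rw [List.getD_replicate _ hi]
    unfold pvGI
    rw [hrow0 i hi, hcol0 i hi]
    ring
  · intro i j hi hj hne
    exact absurd (hE0 i j hi hj) hne
  · intro x y hy
    rw [PySem.Dict.getD_empty] at hy
    simp at hy
  · intro x
    rw [PySem.Dict.getD_empty]
    exact List.nodup_nil

theorem step_eq (friends : List String) (hnd : friends.Nodup) (g : String)
    (hs : ((PySem.Str.split? g " ").getD []).getD 0 "" ∈ friends)
    (hr : ((PySem.Str.split? g " ").getD []).getD 1 "" ∈ friends)
    (M : List (List Int)) (c : PySem.Dict (Int × Int) Int) (gi : List Int)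
    (adj : PySem.Dict Int (PySem.Set Int)) :
    ∃ a b : Nat, a < friends.length ∧ b < friends.length ∧
      pyA_step friends M g = M.set a ((M.getD a []).set b ((M.getD a []).getD b 0 + 1)) ∧
      pyB_step friends (c, gi, adj) g =
        (c.insert ((a:Int),(b:Int)) (c.getD ((a:Int),(b:Int)) 0 + 1),
         (gi.set a (gi.getD a 0 + 1)).set b ((gi.set a (gi.getD a 0 + 1)).getD b 0 - 1),
         (adj.modify (a:Int) [] (fun t => PySem.Set.add t (b:Int))).modify (b:Int) []
           (fun t => PySem.Set.add t (a:Int))) := by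
  obtain ⟨a, ha, hfa⟩ := List.mem_iff_getElem.mp hs
  obtain ⟨b, hb, hfb⟩ := List.mem_iff_getElem.mp hr
  have hga : (pyA_friend_to_num friends).getD (((PySem.Str.split? g " ").getD []).getD 0 "") 0
      = (a : Int) := by rw [← hfa]; exact f2n_getD friends hnd a ha
  have hgb : (pyA_friend_to_num friends).getD (((PySem.Str.split? g " ").getD []).getD 1 "") 0
      = (b : Int) := by rw [← hfb]; exact f2n_getD friends hnd b hb
  refine ⟨a, b, ha, hb, ?_, ?_⟩
  · unfold pyA_step
    simp only [hga, hgb, PySem.List.pySetD_natCast, PySem.List.pyGetD_natCast]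
  · unfold pyB_step
    simp only [idx_eq, hga, hgb, PySem.List.pySetD_natCast, PySem.List.pyGetD_natCast]

theorem inv_fold (friends : List String) (hnd : friends.Nodup) (gs : List String)
    (hg : ∀ g ∈ gs, ((PySem.Str.split? g " ").getD []).length = 2 ∧
      ((PySem.Str.split? g " ").getD []).getD 0 "" ∈ friends ∧
      ((PySem.Str.split? g " ").getD []).getD 1 "" ∈ friends) :
    ∀ (M : List (List Int)) (c : PySem.Dict (Int × Int) Int) (gi : List Int)
      (adj : PySem.Dict Int (PySem.Set Int)),
      pvInv friends.length M c gi adj →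
      pvInv friends.length (gs.foldl (pyA_step friends) M)
        (gs.foldl (pyB_step friends) (c, gi, adj)).1
        (gs.foldl (pyB_step friends) (c, gi, adj)).2.1
        (gs.foldl (pyB_step friends) (c, gi, adj)).2.2 := by
  induction gs with
  | nil => intro M c gi adj h; simpa using h
  | cons g t ih =>
    intro M c gi adj h
    obtain ⟨h2, hs, hr⟩ := hg g (List.mem_cons_self)
    obtain ⟨a, b, ha, hb, eA, eB⟩ := step_eq friends hnd g hs hr M c gi adj
    simp only [List.foldl_cons, eA, eB]
    exact ih (fun g' hg' => hg g' (List.mem_cons_of_mem _ hg')) _ _ _ _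
      (inv_update friends.length a b ha hb M c gi adj h)

theorem inv_final (friends gifts : List String) (hnd : friends.Nodup)
    (hg : ∀ g ∈ gifts, ((PySem.Str.split? g " ").getD []).length = 2 ∧
      ((PySem.Str.split? g " ").getD []).getD 0 "" ∈ friends ∧
      ((PySem.Str.split? g " ").getD []).getD 1 "" ∈ friends) :
    pvInv friends.length (pyA_giftsMap friends gifts) (pyB_st friends gifts).1
      (pyB_st friends gifts).2.1 (pyB_st friends gifts).2.2 := by
  unfold pyA_giftsMap pyB_st
  exact inv_fold friends hnd gifts hg _ _ _ _ (inv_init friends)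

-- ===== A's result list is [pvW M n 0, …, pvW M n (n-1)] =====

theorem length_pvIncr (l : List Int) (t : Option Nat) : (pvIncr l t).length = l.length := by
  cases t <;> simp [pvIncr]

theorem foldl_incr_len {α : Type} (L : List α) (f : List Int → α → List Int)
    (tg : α → Option Nat) (hf : ∀ l x, x ∈ L → f l x = pvIncr l (tg x)) (l0 : List Int) :
    (L.foldl f l0).length = l0.length := by
  induction L generalizing l0 with
  | nil => rfl
  | cons x t ih =>
    rw [List.foldl_cons, hf l0 x List.mem_cons_self,
      ih (fun l y hy => hf l y (List.mem_cons_of_mem _ hy)), length_pvIncr]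

theorem getD_pvIncr (l : List Int) (t : Option Nat) (k : Nat)
    (hb : ∀ j, t = some j → j < l.length) :
    (pvIncr l t).getD k 0 = l.getD k 0 + (if t == some k then 1 else 0) := by
  cases t with
  | none => simp [pvIncr]
  | some j =>
    by_cases hjk : j = k
    · subst hjk
      simp only [pvIncr, beq_self_eq_true, if_true]
      rw [getD_set_self l j _ 0 (hb j rfl)]
    · simp only [pvIncr]
      rw [getD_set_ne l j k _ 0 (Ne.symm hjk)]
      simp [hjk]

theorem foldl_incr_getD {α : Type} (L : List α) (f : List Int → α → List Int)
    (tg : α → Option Nat) (hf : ∀ l x, x ∈ L → f l x = pvIncr l (tg x)) (l0 : List Int)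
    (hbnd : ∀ x ∈ L, ∀ k, tg x = some k → k < l0.length) (k : Nat) :
    (L.foldl f l0).getD k 0 = l0.getD k 0 + (L.countP (fun x => tg x == some k) : Int) := by
  induction L generalizing l0 with
  | nil => simp
  | cons x t ih =>
    rw [List.foldl_cons, hf l0 x List.mem_cons_self]
    rw [ih (fun l y hy => hf l y (List.mem_cons_of_mem _ hy)) (pvIncr l0 (tg x))
      (by rw [length_pvIncr]; exact fun y hy k' h => hbnd y (List.mem_cons_of_mem _ hy) k' h)]
    rw [getD_pvIncr l0 (tg x) k (fun j hj => hbnd x List.mem_cons_self j hj)]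
    rw [List.countP_cons]
    by_cases hx : (tg x == some k) = true
    · simp [hx]
      ring
    · simp [hx]

theorem double_foldl_incr (n : Nat) (J : Nat → List Nat) (f : List Int → Nat → Nat → List Int)
    (tg : Nat → Nat → Option Nat)
    (hf : ∀ l i j, i < n → j ∈ J i → f l i j = pvIncr l (tg i j))
    (l0 : List Int) (hbnd : ∀ i j k, i < n → j ∈ J i → tg i j = some k → k < l0.length) :
    (((List.range n).foldl (fun l i => (J i).foldl (fun l j => f l i j) l) l0).length = l0.length)
    ∧ ∀ k : Nat,
      ((List.range n).foldl (fun l i => (J i).foldl (fun l j => f l i j) l) l0).getD k 0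
        = l0.getD k 0
          + ((((List.range n).map (fun i => (J i).countP (fun j => tg i j == some k))).sum : Nat) : Int) := by
  induction n generalizing l0 with
  | zero => simp
  | succ m ih =>
    have hf' : ∀ l i j, i < m → j ∈ J i → f l i j = pvIncr l (tg i j) :=
      fun l i j hi hj => hf l i j (by omega) hj
    have hbnd' : ∀ i j k, i < m → j ∈ J i → tg i j = some k → k < l0.length :=
      fun i j k hi hj h => hbnd i j k (by omega) hj h
    obtain ⟨ihlen, ihgetD⟩ := ih hf' l0 hbnd'
    rw [List.range_succ]
    constructor
    · rw [List.foldl_append, List.foldl_cons, List.foldl_nil]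
      rw [foldl_incr_len (J m) (fun l j => f l m j) (tg m)
        (fun l j hj => hf l m j (by omega) hj), ihlen]
    · intro k
      rw [List.foldl_append, List.foldl_cons, List.foldl_nil]
      rw [foldl_incr_getD (J m) (fun l j => f l m j) (tg m)
        (fun l j hj => hf l m j (by omega) hj) _
        (by rw [ihlen]; exact fun j hj k' h => hbnd m j k' (by omega) hj h) k]
      rw [ihgetD k, List.map_append, List.sum_append]
      push_cast
      simp [add_assoc]

theorem tgA_beq (M : List (List Int)) (i j k : Nat) :
    (pvTgA M (i, j) == some k) = (decide (i = k) && decide (¬ i = j) && pvBeat M i j) := by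
  unfold pvTgA
  by_cases hc : i ≠ j ∧ pvBeat M i j = true
  · rw [if_pos hc]
    simp [hc.1, hc.2, beq_eq_decide]
  · rw [if_neg hc]
    rcases Decidable.not_and_iff_not_or_not.mp hc with h | h
    · simp at h; simp [h]
    · simp at h; simp [h]

theorem sum_single (n k : Nat) (f : Nat → Nat) (hk : k < n) (hz : ∀ i, i ≠ k → f i = 0) :
    ((List.range n).map f).sum = f k := by
  induction n with
  | zero => omega
  | succ m ih =>
    rw [List.range_succ, List.map_append, List.sum_append]
    by_cases hm : k = m
    · subst hm
      have : ∀ i ∈ List.range k, f i = 0 := by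
        intro i hi; simp at hi; exact hz i (by omega)
      rw [List.map_congr_left this]; simp
    · rw [ih (by omega)]; simp [hz m (fun h => hm h.symm)]

theorem resultA_eq (friends gifts : List String) (hnd : friends.Nodup)
    (hg : ∀ g ∈ gifts, ((PySem.Str.split? g " ").getD []).length = 2 ∧
      ((PySem.Str.split? g " ").getD []).getD 0 "" ∈ friends ∧
      ((PySem.Str.split? g " ").getD []).getD 1 "" ∈ friends) :
    pyA_result friends gifts
      = (List.range friends.length).map (pvW (pyA_giftsMap friends gifts) friends.length) := by
  obtain ⟨hMlen, hrows, _, _, _, _, _, _⟩ := inv_final friends gifts hnd hg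
  unfold pyA_result
  simp only [hMlen, PySem.List.pyRange_zero_nat, List.foldl_map]
  have hinitA : List.map (fun _ => (0:Int)) (List.map (fun k : Nat => (k:Int)) (List.range friends.length))
      = List.replicate friends.length (0:Int) := by
    simp [List.map_map, Function.comp_def, List.map_const']
  rw [hinitA]
  set M := pyA_giftsMap friends gifts with hM
  set n := friends.length with hn
  have hfA : ∀ (l : List Int) (i j : Nat), i < n → j ∈ List.range n →
      (if ((i:Int) == (j:Int)) = true then l
       else
        if PySem.List.pyGetD (PySem.List.pyGetD M (i:Int) []) (j:Int) 0 >
            PySem.List.pyGetD (PySem.List.pyGetD M (j:Int) []) (i:Int) 0 then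
          PySem.List.pySetD l (i:Int) (PySem.List.pyGetD l (i:Int) 0 + 1)
        else
          if (PySem.List.pyGetD (PySem.List.pyGetD M (i:Int) []) (j:Int) 0 ==
              PySem.List.pyGetD (PySem.List.pyGetD M (j:Int) []) (i:Int) 0) = true then
            if (pyA_fgi friends gifts).getD ((pyA_num_to_friend friends).getD (j:Int) "") 0 <
                (pyA_fgi friends gifts).getD ((pyA_num_to_friend friends).getD (i:Int) "") 0 then
              PySem.List.pySetD l (i:Int) (PySem.List.pyGetD l (i:Int) 0 + 1)
            else l
          else l)
      = pvIncr l (pvTgA M (i, j)) := by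
    intro l i j hi hj
    have hj' : j < n := List.mem_range.mp hj
    rw [n2f_getD friends j hj', n2f_getD friends i hi,
      fgi_getD friends gifts hnd j hj', fgi_getD friends gifts hnd i hi, ← hM]
    simp only [PySem.List.pyGetD_natCast, PySem.List.pySetD_natCast]
    by_cases hij : i = j
    · subst hij
      simp [pvTgA, pvIncr]
    · have hijc : ((i:Int) == (j:Int)) = false := by
        simp [Nat.cast_inj]
        exact hij
      rw [hijc]
      simp only [Bool.false_eq_true, if_false]
      rcases lt_trichotomy ((M.getD j []).getD i 0) ((M.getD i []).getD j 0) with hlt | heq | hgt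
      · rw [if_pos hlt]
        have hb : pvBeat M i j = true := by
          unfold pvBeat pvGetE
          simp only [Bool.or_eq_true, Bool.and_eq_true, decide_eq_true_eq, beq_iff_eq]; omega
        unfold pvTgA
        rw [if_pos ⟨hij, hb⟩]
        rfl
      · rw [if_neg (by omega), if_pos (by simp only [beq_iff_eq]; omega)]
        rcases lt_trichotomy (pvGI M j) (pvGI M i) with hg1 | hg2 | hg3
        · rw [if_pos hg1]
          have hb : pvBeat M i j = true := by
            unfold pvBeat pvGetE
            simp only [Bool.or_eq_true, Bool.and_eq_true, decide_eq_true_eq, beq_iff_eq]; omega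
          unfold pvTgA
          rw [if_pos ⟨hij, hb⟩]
          rfl
        · rw [if_neg (by omega)]
          have hb : pvBeat M i j = false := by
            unfold pvBeat pvGetE
            simp only [Bool.or_eq_false_iff, Bool.and_eq_false_iff, decide_eq_false_iff_not,
              beq_eq_false_iff_ne]; omega
          unfold pvTgA
          rw [if_neg (by simp [hb])]
          rfl
        · rw [if_neg (by omega)]
          have hb : pvBeat M i j = false := by
            unfold pvBeat pvGetE
            simp only [Bool.or_eq_false_iff, Bool.and_eq_false_iff, decide_eq_false_iff_not,
              beq_eq_false_iff_ne]; omega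
          unfold pvTgA
          rw [if_neg (by simp [hb])]
          rfl
      · rw [if_neg (by omega), if_neg (by simp only [beq_iff_eq]; omega)]
        have hb : pvBeat M i j = false := by
          unfold pvBeat pvGetE
          simp only [Bool.or_eq_false_iff, Bool.and_eq_false_iff, decide_eq_false_iff_not,
            beq_eq_false_iff_ne]; omega
        unfold pvTgA
        rw [if_neg (by simp [hb])]
        rfl
  have hbndA : ∀ i j k, i < n → j ∈ List.range n → pvTgA M (i, j) = some k →
      k < (List.replicate n (0:Int)).length := by
    intro i j k hi _ h
    unfold pvTgA at h
    by_cases hc : i ≠ j ∧ pvBeat M i j = true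
    · rw [if_pos hc] at h
      cases h
      simpa using hi
    · rw [if_neg hc] at h
      cases h
  obtain ⟨hAlen, hAget⟩ := double_foldl_incr n (fun _ => List.range n) _ _ hfA
    (List.replicate n (0:Int)) hbndA
  have hWk : ∀ k, k < n →
      ((List.range n).map
        (fun i => (List.range n).countP (fun j => pvTgA M (i, j) == some k))).sum = pvCntA M n k := by
    intro k hk
    rw [sum_single n k _ hk (by
      intro i hik
      rw [List.countP_eq_zero]
      intro j _
      rw [tgA_beq]; simp [hik])]
    unfold pvCntA
    apply List.countP_congr
    intro j _
    rw [tgA_beq]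
    simp
    intro _
    omega
  apply List.ext_getElem
  · rw [hAlen]; simp
  · intro k h1 h2
    have hk : k < n := by simpa using h2
    rw [← List.getD_eq_getElem _ 0 h1, hAget k, hWk k hk]
    simp [pvW]

-- ===== B's value computations =====

-- the first-occurrence fold over enumerate: lookup is the index of the first occurrence
theorem first_fold_get? (l : List Int) (v : Int) :
    ∀ (s : Int) (d : PySem.Dict Int Int),
    ((PySem.List.enumerate l s).foldl
        (fun d p => if d.contains p.2 then d else d.insert p.2 p.1) d).get? v
      = if d.contains v then d.get? v
        else (PySem.List.index? l v).map (fun k => s + (k : Int)) := by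
  induction l with
  | nil =>
    intro s d
    rw [PySem.List.enumerate_nil, List.foldl_nil]
    by_cases h : d.contains v = true
    · rw [if_pos h]
    · rw [if_neg h]
      rw [(PySem.Dict.get?_eq_none_iff_contains d v).mpr (by simpa using h)]
      simp [PySem.List.index?_eq_idxOf?]
  | cons x t ih =>
    intro s d
    rw [PySem.List.enumerate_cons, List.foldl_cons]
    by_cases hx : d.contains x = true
    · have hstep : (if d.contains (s, x).2 then d else d.insert (s, x).2 (s, x).1) = d := by
        simp [hx]
      rw [hstep, ih (s+1) d]
      by_cases hv : d.contains v = true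
      · rw [if_pos hv, if_pos hv]
      · have hxv : x ≠ v := by
          intro he; subst he; exact hv hx
        rw [if_neg hv, if_neg hv, PySem.List.index?_cons_of_ne t hxv]
        cases h : PySem.List.index? t v with
        | none => simp
        | some k =>
          simp
          ring
    · have hstep : (if d.contains (s, x).2 then d else d.insert (s, x).2 (s, x).1)
          = d.insert x s := by
        simp [hx]
      rw [hstep, ih (s+1) (d.insert x s)]
      by_cases hv : v = x
      · subst hv
        rw [if_pos (PySem.Dict.contains_insert_self d v s),
          PySem.Dict.get?_insert_self, if_neg hx, PySem.List.index?_cons_self]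
        simp
      · rw [PySem.Dict.contains_insert, show (v == x) = false by simpa using hv, Bool.false_or]
        rw [PySem.Dict.get?_insert_of_ne d s hv]
        by_cases hc : d.contains v = true
        · rw [if_pos hc, if_pos hc]
        · rw [if_neg hc, if_neg hc, PySem.List.index?_cons_of_ne t (Ne.symm hv)]
          cases h : PySem.List.index? t v with
          | none => simp
          | some k =>
            simp
            ring

-- in a sorted list, the index of the first occurrence of a member counts the smaller elements
theorem index?_sorted (gi : List Int) (v : Int) (hv : v ∈ PySem.List.sorted gi (fun x => x) false) :
    PySem.List.index? (PySem.List.sorted gi (fun x => x) false) v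
      = some (gi.countP (fun x => decide (x < v))) := by
  obtain ⟨k, hk⟩ := Option.isSome_iff_exists.mp
    ((PySem.List.index?_isSome_iff _ v).mpr hv)
  obtain ⟨pre, suf, hdec, hlen, hvpre⟩ := (PySem.List.index?_eq_some_iff _ v k).mp hk
  have hcount : (PySem.List.sorted gi (fun x => x) false).countP (fun x => decide (x < v))
      = gi.countP (fun x => decide (x < v)) :=
    (PySem.List.sorted_perm gi (fun x => x) false).countP_eq _
  have hpw := PySem.List.sorted_pairwise gi (fun x => x)
  rw [hdec] at hpw
  obtain ⟨hp1, hp2, hcross⟩ := List.pairwise_append.mp hpw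
  have hpre : pre.countP (fun x => decide (x < v)) = pre.length :=
    List.countP_eq_length.mpr (fun a ha => by
      have hle : a ≤ v := hcross a ha v List.mem_cons_self
      have hne : a ≠ v := fun he => hvpre (he ▸ ha)
      simpa using lt_of_le_of_ne hle hne)
  have hsuf : suf.countP (fun x => decide (x < v)) = 0 :=
    List.countP_eq_zero.mpr (fun a ha => by
      have hge : v ≤ a := (List.pairwise_cons.mp hp2).1 a ha
      simp
      omega)
  rw [hk, ← hcount, hdec, List.countP_append, List.countP_cons, hpre, hsuf]
  simp [hlen]

theorem sum_map_ite_filter (l : List Nat) (p : Nat → Bool) (f : Nat → Int) :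
    (l.map (fun k => if p k then f k else 0)).sum = ((l.filter p).map f).sum := by
  induction l with
  | nil => rfl
  | cons x t ih =>
    by_cases hx : p x = true
    · simp [hx, ih]
    · simp [hx, ih]

-- sum over a Nodup list of casts of naturals < n equals the sum over range n when δ vanishes off the list
theorem sum_map_subset (S : List Int) (n : Nat) (δ : Int → Int)
    (hS : S.Nodup) (hmem : ∀ y ∈ S, ∃ k : Nat, k < n ∧ y = (k:Int))
    (hz : ∀ k : Nat, k < n → (k:Int) ∉ S → δ (k:Int) = 0) :
    (S.map δ).sum = ((List.range n).map (fun k : Nat => δ (k:Int))).sum := by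
  classical
  set T := (List.range n).filter (fun k : Nat => decide ((k:Int) ∈ S)) with hT
  have hTc : (T.map (fun k : Nat => (k:Int))).Nodup :=
    ((List.nodup_range).filter _).map (fun a b h => by exact_mod_cast h)
  have hperm : S.Perm (T.map (fun k : Nat => (k:Int))) := by
    rw [List.perm_ext_iff_of_nodup hS hTc]
    intro y
    constructor
    · intro hy
      obtain ⟨k, hk, rfl⟩ := hmem y hy
      exact List.mem_map.mpr ⟨k, by
        rw [hT, List.mem_filter]
        exact ⟨List.mem_range.mpr hk, by simpa using hy⟩, rfl⟩
    · intro hy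
      obtain ⟨k, hk, rfl⟩ := List.mem_map.mp hy
      rw [hT, List.mem_filter] at hk
      simpa using hk.2
  rw [(hperm.map δ).sum_eq, List.map_map]
  have hcongr : ∀ k ∈ List.range n,
      δ (k:Int) = if decide ((k:Int) ∈ S) then δ (k:Int) else 0 := by
    intro k hk
    by_cases h : (k:Int) ∈ S
    · simp [h]
    · simp only [h, decide_false, Bool.false_eq_true, if_false]
      exact hz k (List.mem_range.mp hk) h
  conv_rhs => rw [List.map_congr_left hcongr]
  rw [sum_map_ite_filter, ← hT]
  simp [Function.comp_def]

theorem w_eq (friends gifts : List String) (_hne : friends ≠ []) (hnd : friends.Nodup)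
    (hg : ∀ g ∈ gifts, ((PySem.Str.split? g " ").getD []).length = 2 ∧
      ((PySem.Str.split? g " ").getD []).getD 0 "" ∈ friends ∧
      ((PySem.Str.split? g " ").getD []).getD 1 "" ∈ friends)
    (i : Nat) (hi : i < friends.length) :
    pyB_w friends gifts (i : Int) = pvW (pyA_giftsMap friends gifts) friends.length i := by
  obtain ⟨hMlen, hrows, hcnt, hgilen, hgiv, hadj, hbnd, hnd2⟩ := inv_final friends gifts hnd hg
  set M := pyA_giftsMap friends gifts with hM
  set n := friends.length with hn
  have hgiList : (pyB_st friends gifts).2.1 = (List.range n).map (fun j => pvGI M j) := by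
    apply List.ext_getElem
    · rw [hgilen]; simp
    · intro k h1 h2
      have hk : k < n := by rw [← hgilen]; exact h1
      rw [← List.getD_eq_getElem _ 0 h1, hgiv k hk]
      simp
  have hgii : PySem.List.pyGetD (pyB_st friends gifts).2.1 (i:Int) 0 = pvGI M i := by
    rw [PySem.List.pyGetD_natCast]
    exact hgiv i hi
  have hvmem : pvGI M i ∈ PySem.List.sorted (pyB_st friends gifts).2.1 (fun x => x) false := by
    rw [PySem.List.mem_sorted, hgiList]
    exact List.mem_map.mpr ⟨i, List.mem_range.mpr hi, rfl⟩
  have hbase : (pyB_first friends gifts).getD (pvGI M i) 0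
      = ((List.range n).countP (fun j => decide (pvGI M j < pvGI M i)) : Int) := by
    unfold pyB_first
    rw [PySem.Dict.getD_eq_get?_getD, first_fold_get? _ _ 0 PySem.Dict.empty,
      PySem.Dict.contains_empty]
    simp only [Bool.false_eq_true, if_false]
    rw [index?_sorted _ _ hvmem, hgiList, List.countP_map]
    simp [Function.comp_def]
  unfold pyB_w
  rw [hgii, hbase]
  set δ : Int → Int := fun j =>
    if (pyB_st friends gifts).1.getD ((i:Int), j) 0 ≠ (pyB_st friends gifts).1.getD (j, (i:Int)) 0 then
      ((if (pyB_st friends gifts).1.getD ((i:Int), j) 0 >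
            (pyB_st friends gifts).1.getD (j, (i:Int)) 0 then (1:Int) else 0)
        - (if PySem.List.pyGetD (pyB_st friends gifts).2.1 j 0 < pvGI M i then (1:Int) else 0))
    else 0 with hδ
  rw [PySem.List.foldl_congr_mem _ _ (fun w j => w + δ j) _ (by
    intro w j _
    rw [hδ]
    dsimp only
    by_cases h : (pyB_st friends gifts).1.getD ((i:Int), j) 0
        ≠ (pyB_st friends gifts).1.getD (j, (i:Int)) 0
    · simp only [if_pos h]
    · simp only [if_neg h]; ring)]
  rw [PySem.List.foldl_add]
  rw [sum_map_subset _ n δ (hnd2 _) (hbnd _) (by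
    intro k hk hknot
    rw [hδ]
    dsimp only
    rw [if_neg]
    intro hc
    rw [← hcnt i k hi hk, ← hcnt k i hk hi] at hc
    by_cases h1 : pvGetE M i k = 0
    · have h2 : pvGetE M k i ≠ 0 := fun h0 => hc (by rw [h1, h0])
      exact hknot (hadj k i hk hi h2).2
    · exact hknot (hadj i k hi hk h1).1)]
  have hptw : ∀ k ∈ List.range n,
      (if (decide (k ≠ i) && pvBeat M i k) = true then (1:Int) else 0)
        = (if decide (pvGI M k < pvGI M i) = true then (1:Int) else 0) + δ (k:Int) := by
    intro k hk
    have hk' : k < n := List.mem_range.mp hk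
    rw [hδ]
    dsimp only
    rw [← hcnt i k hi hk', ← hcnt k i hk' hi, PySem.List.pyGetD_natCast, hgiv k hk']
    by_cases hki : k = i
    · subst hki
      simp [pvBeat]
    · have hd : decide (k ≠ i) = true := by simp [hki]
      rw [hd, Bool.true_and]
      have hbeq : pvBeat M i k
          = decide (pvGetE M k i < pvGetE M i k
              ∨ (pvGetE M i k = pvGetE M k i ∧ pvGI M k < pvGI M i)) := by
        unfold pvBeat
        by_cases h1 : pvGetE M k i < pvGetE M i k <;>
          by_cases h2 : pvGetE M i k = pvGetE M k i <;>
          by_cases h3 : pvGI M k < pvGI M i <;>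
          simp [h1, h2, h3]
      rw [hbeq]
      simp only [decide_eq_true_eq, gt_iff_lt, ne_eq]
      split_ifs <;> omega
  unfold pvW pvCntA
  rw [← PySem.List.sum_map_ite_one_zero (fun j => decide (j ≠ i) && pvBeat M i j) (List.range n),
    List.map_congr_left hptw, PySem.List.sum_map_add_int,
    PySem.List.sum_map_ite_one_zero (fun j : Nat => decide (pvGI M j < pvGI M i)) (List.range n)]

theorem max_getD_eq_foldl (l : List Int) (hne : l ≠ []) (h0 : 0 ≤ l.getD 0 0) :
    (PySem.List.max? l (fun x => x)).getD 0 = l.foldl (fun b x => max b x) 0 := by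
  cases l with
  | nil => exact absurd rfl hne
  | cons x t =>
    rw [PySem.List.max?_id_cons, Option.getD_some, List.foldl_cons]
    have : max 0 x = x := max_eq_right (by simpa using h0)
    rw [this]

-- ===== VERDICT (by name: the statement is the Claim_ definition above) =====
theorem solution_spec : Claim_equal_solution := by
  intro friends gifts _ hpre
  obtain ⟨hne, hnd, hg⟩ := hpre
  unfold Spec_solution solution solution_alt
  have hres := resultA_eq friends gifts hnd hg
  have hn : 0 < friends.length := List.length_pos_iff.mpr hne
  rw [hres]
  rw [max_getD_eq_foldl _ (by simp; omega) (by
    rw [List.getD_eq_getElem _ 0 (by simpa using hn)]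
    simp only [List.getElem_map]
    exact Int.natCast_nonneg _)]
  rw [PySem.List.pyRange_zero_nat, List.foldl_map, List.foldl_map]
  apply PySem.List.foldl_congr_mem
  intro acc k hk
  rw [w_eq friends gifts hne hnd hg k (List.mem_range.mp hk)]
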